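-- pv_equiv track=rewrite | github.com/davidxk/Algorithm-Implementations | dp/py/max_subarray.py | maximum_subarray_cooldown
-- ===== SOURCE A (Python) =====
-- def maximum_subarray_cooldown(nums, cd):
--     OPT = [0] * len(nums)
--     sums = list(nums)
--     for i in range(1, len(nums)):
--         sums[i] += sums[i - 1]
--     tmpMax = 0
--     for i in range(len(nums)):
--         OPT[i] = max(OPT[i - 1], sums[i] + tmpMax)
--         OPT_p = OPT[i - cd] if i - cd >= 0 else 0
--         tmpMax = max(tmpMax, OPT_p - sums[i])
--     return OPT[-1]
-- ===== SOURCE B (Python) =====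
-- def maximum_subarray_cooldown(nums, cd):
--     opts = []
--     end = 0
--     for i, x in enumerate(nums):
--         pre = opts[i - 1 - cd] if i - 1 - cd >= 0 else 0
--         end = x + max(end, pre)
--         opts.append(max(opts[-1] if opts else 0, end))
--     return opts[-1]
-- ===== Notes on version B (the rewrite author's own statement) =====
-- stated objective: simpler
-- what changed: B drops A's prefix-sum array and the tmpMax-of-(OPT_p - sums[j]) bookkeeping entirely: it runs a single pass maintaining 'end' (best total whose last chosen subarray ends at the current index) and appends OPT values, the classic two-state cooldown DP.
import Mathlib
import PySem

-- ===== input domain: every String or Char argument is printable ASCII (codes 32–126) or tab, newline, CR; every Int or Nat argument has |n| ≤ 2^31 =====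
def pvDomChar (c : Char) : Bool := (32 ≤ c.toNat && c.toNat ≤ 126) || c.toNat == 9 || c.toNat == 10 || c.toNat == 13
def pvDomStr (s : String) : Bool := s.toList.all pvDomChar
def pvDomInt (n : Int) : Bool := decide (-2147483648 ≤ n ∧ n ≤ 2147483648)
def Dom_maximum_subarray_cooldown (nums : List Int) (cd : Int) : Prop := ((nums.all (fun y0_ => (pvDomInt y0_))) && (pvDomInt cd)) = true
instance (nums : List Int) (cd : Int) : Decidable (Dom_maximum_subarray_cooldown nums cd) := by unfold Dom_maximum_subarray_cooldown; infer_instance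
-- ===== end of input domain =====

-- B drops A's prefix-sum array and tmpMax bookkeeping for a single-pass two-state DP
-- ('end' = best total whose last chosen subarray ends here, plus the OPT list): same cost,
-- simpler and shorter.

-- ===== PORT A =====
def maximum_subarray_cooldown (nums : List Int) (cd : Int) : Int :=
  let n := nums.length
  -- sums = list(nums); for i in range(1, len(nums)): sums[i] += sums[i-1]
  let sums := (List.range' 1 (n - 1)).foldl
    (fun s i => s.set i (s.getD i 0 + s.getD (i - 1) 0)) nums
  -- tmpMax = 0; for i in range(len(nums)): ...
  let res := (List.range n).foldl
    (fun (st : List Int × Int) (i : Nat) =>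
      let v := max ((PySem.List.pyGet? st.1 ((i : Int) - 1)).getD 0) (sums.getD i 0 + st.2)
      let O := st.1.set i v
      let p := if (i : Int) - cd ≥ 0 then (PySem.List.pyGet? O ((i : Int) - cd)).getD 0 else 0
      (O, max st.2 (p - sums.getD i 0)))
    (List.replicate n 0, 0)
  (PySem.List.pyGet? res.1 (-1)).getD 0  -- return OPT[-1]

-- ===== PORT B =====
def maximum_subarray_cooldown_alt (nums : List Int) (cd : Int) : Int :=
  -- opts = []; end = 0; for i, x in enumerate(nums): ...
  let res := (PySem.List.enumerate nums 0).foldl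
    (fun (st : List Int × Int) (p : Int × Int) =>
      let pre := if p.1 - 1 - cd ≥ 0 then (PySem.List.pyGet? st.1 (p.1 - 1 - cd)).getD 0 else 0
      let e := p.2 + max st.2 pre
      (st.1 ++ [max (st.1.getLast?.getD 0) e], e))
    ([], 0)
  (PySem.List.pyGet? res.1 (-1)).getD 0  -- return opts[-1]

-- ===== PRECONDITION & SPEC =====
-- A raises IndexError on empty nums (OPT[-1]) and, for nonempty nums, whenever cd < 0
-- (OPT[i - cd] is read past the end of OPT); Pre_ excludes exactly those inputs.
def Pre_maximum_subarray_cooldown (nums : List Int) (cd : Int) : Prop := nums ≠ [] ∧ 0 ≤ cd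
instance (nums : List Int) (cd : Int) : Decidable (Pre_maximum_subarray_cooldown nums cd) := by
  unfold Pre_maximum_subarray_cooldown; infer_instance

def pvWitness_maximum_subarray_cooldown : List Int × Int := ([3, -9, 2, 4, -1, 5], 2)

def Spec_maximum_subarray_cooldown (nums : List Int) (cd : Int) (out : Int) : Prop := out = maximum_subarray_cooldown_alt nums cd
instance (nums : List Int) (cd : Int) (out : Int) : Decidable (Spec_maximum_subarray_cooldown nums cd out) := by unfold Spec_maximum_subarray_cooldown; infer_instance

-- ===== CLAIM (what is proved, stated in full; the proofs are below) =====
def Claim_equal_maximum_subarray_cooldown : Prop := ∀ (nums : List Int) (cd : Int), Dom_maximum_subarray_cooldown nums cd → Pre_maximum_subarray_cooldown nums cd → Spec_maximum_subarray_cooldown nums cd (maximum_subarray_cooldown nums cd)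

-- ===== LEMMAS AND PROOFS =====

-- A's prefix-sums pass, named
def pvSums (nums : List Int) : List Int :=
  (List.range' 1 (nums.length - 1)).foldl
    (fun s i => s.set i (s.getD i 0 + s.getD (i - 1) 0)) nums

-- A's main loop body, named
def pvAStep (cd : Int) (S : List Int) (st : List Int × Int) (i : Nat) : List Int × Int :=
  let v := max ((PySem.List.pyGet? st.1 ((i : Int) - 1)).getD 0) (S.getD i 0 + st.2)
  let O := st.1.set i v
  let p := if (i : Int) - cd ≥ 0 then (PySem.List.pyGet? O ((i : Int) - cd)).getD 0 else 0
  (O, max st.2 (p - S.getD i 0))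

-- B's loop, as a structural recursion on the list with the running index s
def pvBrun (cd : Int) : List Int → Int → (List Int × Int) → (List Int × Int)
  | [], _, st => st
  | x :: xs, s, st =>
      let pre := if s - 1 - cd ≥ 0 then (PySem.List.pyGet? st.1 (s - 1 - cd)).getD 0 else 0
      let e := x + max st.2 pre
      pvBrun cd xs (s + 1) (st.1 ++ [max (st.1.getLast?.getD 0) e], e)

-- functional prefix sums, to characterise pvSums
def pscan (a : Int) : List Int → List Int
  | [] => []
  | x :: xs => (a + x) :: pscan (a + x) xs

lemma pscan_length (a : Int) (l : List Int) : (pscan a l).length = l.length := by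
  induction l generalizing a with
  | nil => rfl
  | cons x xs ih => simp [pscan, ih]

lemma pscan_concat (l : List Int) (a x : Int) :
    pscan a (l ++ [x]) = pscan a l ++ [a + l.sum + x] := by
  induction l generalizing a with
  | nil => simp [pscan]
  | cons y ys ih =>
    simp only [List.cons_append, pscan, ih, List.sum_cons]
    have h : a + y + ys.sum + x = a + (y + ys.sum) + x := by ring
    rw [h]

lemma pscan_getElem? (l : List Int) (a : Int) (i : Nat) (hi : i < l.length) :
    (pscan a l)[i]? = some (a + (l.take (i + 1)).sum) := by
  induction l generalizing a i with
  | nil => simp at hi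
  | cons x xs ih =>
    cases i with
    | zero => simp [pscan]
    | succ j =>
      simp only [pscan, List.getElem?_cons_succ]
      rw [ih (a + x) j (by simpa using hi)]
      simp only [List.take_succ_cons, List.sum_cons]
      congr 1
      ring

lemma pvSums_eq (nums : List Int) : pvSums nums = pscan 0 nums := by
  have key : ∀ k, k ≤ nums.length - 1 →
      (List.range' 1 k).foldl
        (fun s i => s.set i (s.getD i 0 + s.getD (i - 1) 0)) nums
        = pscan 0 (nums.take (k + 1)) ++ nums.drop (k + 1) := by
    intro k
    induction k with
    | zero =>
      intro _
      cases nums with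
      | nil => simp [pscan]
      | cons x xs => simp [pscan]
    | succ m ih =>
      intro hm
      have hm' : m ≤ nums.length - 1 := by omega
      have hlt : m + 1 < nums.length := by omega
      rw [List.range'_1_concat, List.foldl_append, ih hm']
      simp only [List.foldl_cons, List.foldl_nil]
      set L := pscan 0 (nums.take (m + 1)) with hL
      have hlen : L.length = m + 1 := by
        rw [hL, pscan_length, List.length_take]; omega
      have hget1 : (L ++ nums.drop (m + 1)).getD (m + 1) 0 = nums.getD (m + 1) 0 := by
        rw [List.getD_eq_getElem?_getD, List.getElem?_append_right (by omega),
          List.getD_eq_getElem?_getD, List.getElem?_drop, hlen]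
        norm_num
      have hget2 : (L ++ nums.drop (m + 1)).getD m 0 = (nums.take (m + 1)).sum := by
        rw [List.getD_eq_getElem?_getD, List.getElem?_append_left (by omega), hL,
          pscan_getElem? _ _ _ (by simp [List.length_take]; omega)]
        simp [List.take_take]
      have hc : 1 + m = m + 1 := Nat.add_comm 1 m
      rw [hc]
      simp only [Nat.add_sub_cancel]
      rw [hget1, hget2]
      have hdrop : nums.drop (m + 1) = nums[m + 1] :: nums.drop (m + 2) := by
        rw [List.drop_eq_getElem_cons hlt]
      have htake : nums.take (m + 2) = nums.take (m + 1) ++ [nums[m + 1]] := by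
        rw [List.take_add_one, List.getElem?_eq_getElem hlt]; rfl
      rw [List.set_append, if_neg (by omega), hlen]
      rw [hdrop]
      simp only [Nat.sub_self]
      rw [List.set_cons_zero]
      rw [htake, pscan_concat]
      have hval : nums.getD (m + 1) 0 = nums[m + 1] := by
        rw [List.getD_eq_getElem?_getD, List.getElem?_eq_getElem hlt]; rfl
      rw [hval]
      simp only [List.append_assoc, List.singleton_append]
      congr 2
      ring
  have hfin := key (nums.length - 1) le_rfl
  unfold pvSums
  rw [hfin]
  rcases nums with _ | ⟨x, xs⟩
  · simp [pscan]
  · simp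

lemma pvSums_getD (nums : List Int) (i : Nat) (hi : i < nums.length) :
    (pvSums nums).getD i 0 = (nums.take (i + 1)).sum := by
  rw [pvSums_eq, List.getD_eq_getElem?_getD, pscan_getElem? _ _ _ hi]
  simp

lemma portA_eq (nums : List Int) (cd : Int) :
    maximum_subarray_cooldown nums cd =
      (PySem.List.pyGet?
        ((List.range nums.length).foldl (pvAStep cd (pvSums nums))
          (List.replicate nums.length 0, 0)).1 (-1)).getD 0 := by
  unfold maximum_subarray_cooldown pvAStep pvSums
  rfl

lemma portB_eq (nums : List Int) (cd : Int) :
    maximum_subarray_cooldown_alt nums cd =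
      (PySem.List.pyGet? (pvBrun cd nums 0 ([], 0)).1 (-1)).getD 0 := by
  have key : ∀ (l : List Int) (s : Int) (st : List Int × Int),
      (PySem.List.enumerate l s).foldl
        (fun (st : List Int × Int) (p : Int × Int) =>
          let pre := if p.1 - 1 - cd ≥ 0 then (PySem.List.pyGet? st.1 (p.1 - 1 - cd)).getD 0 else 0
          let e := p.2 + max st.2 pre
          (st.1 ++ [max (st.1.getLast?.getD 0) e], e)) st
        = pvBrun cd l s st := by
    intro l
    induction l with
    | nil => intro s st; simp [PySem.List.enumerate_nil, pvBrun]
    | cons x xs ih =>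
      intro s st
      rw [PySem.List.enumerate_cons, List.foldl_cons, pvBrun, ih]
  unfold maximum_subarray_cooldown_alt
  rw [key]

lemma pvBrun_append (cd : Int) (l1 l2 : List Int) (s : Int) (st : List Int × Int) :
    pvBrun cd (l1 ++ l2) s st = pvBrun cd l2 (s + l1.length) (pvBrun cd l1 s st) := by
  induction l1 generalizing s st with
  | nil => simp [pvBrun]
  | cons x xs ih =>
    simp only [List.cons_append, pvBrun, ih, List.length_cons]
    have h : s + 1 + (xs.length : Int) = s + ((xs.length + 1 : Nat) : Int) := by push_cast; ring
    rw [h]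

-- the pre-lookup B makes at step i, from the finished opts list
def pvPre (cd : Int) (L : List Int) (i : Nat) : Int :=
  if (i : Int) - 1 - cd ≥ 0 then (PySem.List.pyGet? L ((i : Int) - 1 - cd)).getD 0 else 0

lemma pvMain (nums : List Int) (cd : Int) (hcd : 0 ≤ cd) (hn : 1 ≤ nums.length) :
    ∀ i, i ≤ nums.length →
      ((List.range i).foldl (pvAStep cd (pvSums nums)) (List.replicate nums.length 0, 0)).1
        = (pvBrun cd (nums.take i) 0 ([], 0)).1 ++ List.replicate (nums.length - i) 0
      ∧ (pvBrun cd (nums.take i) 0 ([], 0)).1.length = i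
      ∧ (i < nums.length →
          (pvSums nums).getD i 0
              + ((List.range i).foldl (pvAStep cd (pvSums nums)) (List.replicate nums.length 0, 0)).2
            = nums.getD i 0
              + max (pvBrun cd (nums.take i) 0 ([], 0)).2
                  (pvPre cd (pvBrun cd (nums.take i) 0 ([], 0)).1 i)) := by
  intro i
  induction i with
  | zero =>
    intro _
    refine ⟨by simp [pvBrun], by simp [pvBrun], ?_⟩
    intro h0
    simp only [List.take_zero, pvBrun]
    rw [pvSums_getD nums 0 h0]
    have hpre0 : pvPre cd ([] : List Int) 0 = 0 := by
      unfold pvPre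
      rw [if_neg (by omega)]
    rw [hpre0]
    rcases nums with _ | ⟨x, xs⟩
    · simp at h0
    · simp
  | succ i ih =>
    intro hi
    obtain ⟨hfold, hlen, hinv⟩ := ih (by omega)
    have hilt : i < nums.length := by omega
    set S := pvSums nums with hS
    set B := pvBrun cd (nums.take i) 0 ([], 0) with hB
    set A := (List.range i).foldl (pvAStep cd S) (List.replicate nums.length 0, 0) with hA
    -- one B step
    have htake : nums.take (i + 1) = nums.take i ++ [nums[i]] := by
      rw [List.take_add_one, List.getElem?_eq_getElem hilt]; rfl
    have hlen' : ((nums.take i).length : Int) = (i : Int) := by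
      rw [List.length_take]; omega
    have hBstep : pvBrun cd (nums.take (i + 1)) 0 ([], 0)
        = (B.1 ++ [max (B.1.getLast?.getD 0) (nums[i] + max B.2 (pvPre cd B.1 i))],
           nums[i] + max B.2 (pvPre cd B.1 i)) := by
      rw [htake, pvBrun_append, ← hB]
      simp only [pvBrun, pvPre, hlen']
      rw [zero_add]
    set e : Int := nums[i] + max B.2 (pvPre cd B.1 i) with he
    set v : Int := max (B.1.getLast?.getD 0) e with hv
    have hinv' := hinv hilt
    have hgetDi : nums.getD i 0 = nums[i] := by
      rw [List.getD_eq_getElem?_getD, List.getElem?_eq_getElem hilt]; rfl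
    -- A's used value equals e
    have hAe : S.getD i 0 + A.2 = e := by rw [hinv', hgetDi]
    -- A's OPT[i-1] lookup equals B's last-or-0
    have hprev : (PySem.List.pyGet? A.1 ((i : Int) - 1)).getD 0 = B.1.getLast?.getD 0 := by
      rw [hfold]
      by_cases h0 : 0 < i
      · have hcast : (i : Int) - 1 = ((i - 1 : Nat) : Int) := by omega
        have hlt : i - 1 < B.1.length := by omega
        rw [hcast, PySem.List.pyGet?_natCast, List.getElem?_append_left hlt,
          List.getLast?_eq_getElem?, hlen]
      · have hi0 : i = 0 := by omega
        subst hi0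
        have hB0 : B.1 = [] := by rw [hB]; rfl
        rw [hB0, List.nil_append]
        obtain ⟨m, hm⟩ : ∃ m, nums.length = m + 1 := ⟨nums.length - 1, by omega⟩
        rw [Nat.sub_zero, hm,
          show List.replicate (m + 1) (0 : Int) = List.replicate m 0 ++ [0] from
            List.replicate_succ',
          show ((0 : Nat) : Int) - 1 = (-1 : Int) by decide,
          PySem.List.pyGet?_neg_one_append_singleton]
        rfl
    -- A's step
    have hAstep : (List.range (i + 1)).foldl (pvAStep cd S) (List.replicate nums.length 0, 0)
        = pvAStep cd S A i := by
      rw [List.range_succ, List.foldl_append, ← hA]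
      rfl
    have hset : A.1.set i v = (B.1 ++ [v]) ++ List.replicate (nums.length - (i + 1)) 0 := by
      rw [hfold, show nums.length - i = (nums.length - (i + 1)) + 1 by omega,
        List.replicate_succ, List.set_append]
      simp [hlen]
    have hnewlen : (B.1 ++ [v]).length = i + 1 := by simp [hlen]
    -- A's OPT_p lookup after the set equals B's pre at i+1
    have hP : (if (i : Int) - cd ≥ 0 then
          (PySem.List.pyGet? (A.1.set i v) ((i : Int) - cd)).getD 0 else 0)
        = pvPre cd (B.1 ++ [v]) (i + 1) := by
      unfold pvPre
      rw [show ((i + 1 : Nat) : Int) - 1 - cd = (i : Int) - cd by push_cast; ring]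
      by_cases h : (i : Int) - cd ≥ 0
      · rw [if_pos h, if_pos h, hset]
        have hidx : ((i : Int) - cd).toNat < (B.1 ++ [v]).length := by
          rw [hnewlen]; omega
        rw [PySem.List.pyGet?_of_nonneg _ h, PySem.List.pyGet?_of_nonneg _ h,
          List.getElem?_append_left hidx]
      · rw [if_neg h, if_neg h]
    refine ⟨?_, ?_, ?_⟩
    · rw [hAstep, hBstep]
      unfold pvAStep
      simp only [hprev, hAe, ← hv]
      exact hset
    · rw [hBstep]
      exact hnewlen
    · intro hi1
      rw [hAstep, hBstep]
      unfold pvAStep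
      simp only [hprev, hAe, ← hv, hP]
      -- prefix-sum recurrence
      have hSi : S.getD i 0 = (nums.take (i + 1)).sum := pvSums_getD nums i hilt
      have hSi1 : S.getD (i + 1) 0 = (nums.take (i + 2)).sum := pvSums_getD nums (i + 1) hi1
      have hrec : S.getD (i + 1) 0 = S.getD i 0 + nums.getD (i + 1) 0 := by
        rw [hSi, hSi1]
        have ht : nums.take (i + 2) = nums.take (i + 1) ++ [nums[i + 1]] := by
          rw [show i + 2 = (i + 1) + 1 from rfl, List.take_add_one,
            List.getElem?_eq_getElem hi1]; rfl
        rw [ht, List.sum_append, List.getD_eq_getElem?_getD, List.getElem?_eq_getElem hi1]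
        simp
      rw [hrec]
      omega

-- ===== VERDICT (by name: the statement is the Claim_ definition above) =====
theorem maximum_subarray_cooldown_spec : Claim_equal_maximum_subarray_cooldown := by
  intro nums cd _ hpre
  obtain ⟨hne, hcd⟩ := hpre
  unfold Spec_maximum_subarray_cooldown
  rw [portA_eq, portB_eq]
  have hn : 1 ≤ nums.length := List.length_pos_iff.mpr hne
  obtain ⟨hfold, hlen, _⟩ := pvMain nums cd hcd hn nums.length le_rfl
  rw [List.take_length] at hfold
  rw [hfold]
  simp
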